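-- pv_equiv track=rewrite | github.com/seopchan/CodingTest | 백준/Silver/5525. IOIOI/IOIOI.py | countIoIPatterns
-- ===== SOURCE A (Python) =====
-- def countIoIPatterns(string, n):
--     pattern_count = 0  # 현재 IOI 패턴이 몇 번 반복되었는지 카운트
--     pattern_counts = []  # 패턴 카운트를 저장할 리스트
--     i = 0
--
--     while i < len(string) - 1:
--         # IOI 패턴을 찾기
--         if string[i:i + 3] == "IOI":
--             pattern_count += 1
--             i += 2  # IOI가 겹치므로 2만큼 이동
--         else:
--             # 패턴이 끊기면 현재 pattern_count를 리스트에 추가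
--             if pattern_count > 0:
--                 pattern_counts.append(pattern_count)
--                 pattern_count = 0  # 패턴이 끊기면 초기화
--             i += 1
--
--     # 마지막으로 남아있는 패턴 카운트를 리스트에 추가
--     if pattern_count > 0:
--         pattern_counts.append(pattern_count)
--
--     return pattern_counts
-- ===== SOURCE B (Python) =====
-- def countIoIPatterns(string, n):
--     # index-table-then-group: collect all IOI match positions, then group
--     # maximal runs where consecutive positions differ by exactly 2
--     pos = [i for i in range(len(string) - 2) if string[i:i+3] == "IOI"]
--     runs = []
--     prev = None
--     run = 0
--     for p in pos:
--         if prev is not None and p == prev + 2: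
--             run += 1
--         else:
--             if run > 0:
--                 runs.append(run)
--             run = 1
--         prev = p
--     if run > 0:
--         runs.append(run)
--     return runs
-- ===== Notes on version B (the rewrite author's own statement) =====
-- stated objective: alternative
-- what changed: Replaces A's stateful jump-by-2 while-scan (counter flushed on every mismatch) with a two-phase decomposition: first build the table of all IOI match positions via a range comprehension, then group that table into maximal runs whose consecutive positions differ by exactly 2, emitting each run's length.
import Mathlib
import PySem

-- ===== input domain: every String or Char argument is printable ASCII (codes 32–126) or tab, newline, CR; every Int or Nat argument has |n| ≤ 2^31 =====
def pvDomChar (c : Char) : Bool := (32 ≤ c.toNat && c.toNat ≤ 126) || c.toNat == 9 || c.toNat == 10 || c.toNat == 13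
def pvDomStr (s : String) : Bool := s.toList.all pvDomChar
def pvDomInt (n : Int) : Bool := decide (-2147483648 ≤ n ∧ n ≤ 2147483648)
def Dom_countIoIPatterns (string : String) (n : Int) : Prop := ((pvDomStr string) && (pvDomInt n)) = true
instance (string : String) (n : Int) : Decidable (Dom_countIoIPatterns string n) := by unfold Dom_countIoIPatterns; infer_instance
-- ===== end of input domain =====

-- B replaces A's stateful jump-by-2 scan with a match-position table grouped into
-- runs of step exactly 2 (objective: alternative decomposition; same cost).

-- ===== PORT A =====
-- A's while loop: i steps by 2 on a match, by 1 otherwise, flushing the counter.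
def pvLoopA (l : List Char) (i : Nat) (c : Int) (acc : List Int) : List Int :=
  if _h : (i : Int) < (l.length : Int) - 1 then
    if PySem.List.slice l (some (i : Int)) (some ((i : Int) + 3)) == ['I', 'O', 'I'] then
      pvLoopA l (i + 2) (c + 1) acc
    else
      pvLoopA l (i + 1) 0 (if c > 0 then acc ++ [c] else acc)
  else
    if c > 0 then acc ++ [c] else acc
termination_by l.length - i
decreasing_by all_goals omega

def countIoIPatterns (string : String) (n : Int) : List Int :=
  pvLoopA string.toList 0 0 []

-- ===== PORT B =====
-- B's loop body over the position table (state: prev?, run, runs).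
def pvStepB (st : Option Int × Int × List Int) (p : Int) : Option Int × Int × List Int :=
  match st with
  | (prev?, run, runs) =>
    if prev?.any (fun q => p == q + 2) then (some p, run + 1, runs)
    else (some p, 1, if run > 0 then runs ++ [run] else runs)

def countIoIPatterns_alt (string : String) (n : Int) : List Int :=
  let l := string.toList
  let pos := (PySem.List.pyRange 0 ((l.length : Int) - 2) 1).filter
    (fun p => PySem.List.slice l (some p) (some (p + 3)) == ['I', 'O', 'I'])
  match pos.foldl pvStepB (none, 0, []) with
  | (_, run, runs) => if run > 0 then runs ++ [run] else runs

-- ===== PRECONDITION & SPEC =====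
def Spec_countIoIPatterns (string : String) (n : Int) (out : List Int) : Prop := out = countIoIPatterns_alt string n
instance (string : String) (n : Int) (out : List Int) : Decidable (Spec_countIoIPatterns string n out) := by unfold Spec_countIoIPatterns; infer_instance

-- ===== CLAIM (what is proved, stated in full; the proofs are below) =====
def Claim_equal_countIoIPatterns : Prop := ∀ (string : String) (n : Int), Dom_countIoIPatterns string n → Spec_countIoIPatterns string n (countIoIPatterns string n)

-- ===== LEMMAS AND PROOFS =====

-- the sorted list of all IOI match positions at index ≥ i
def posFrom (l : List Char) (i : Nat) : List Int :=
  if _ : i < l.length then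
    if (l.drop i).take 3 = ['I', 'O', 'I'] then
      (i : Int) :: posFrom l (i + 1)
    else posFrom l (i + 1)
  else []
termination_by l.length - i

-- group a position list into runs: expected-next position e, current run length c
def gr (e : Int) (c : Int) : List Int → List Int
  | [] => if c > 0 then [c] else []
  | p :: ps => if p = e then gr (p + 2) (c + 1) ps
               else (if c > 0 then [c] else []) ++ gr (p + 2) 1 ps

lemma take3_iff (xs : List Char) (a b c : Char) :
    xs.take 3 = [a, b, c] ↔ xs[0]? = some a ∧ xs[1]? = some b ∧ xs[2]? = some c := by
  match xs with
  | [] => simp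
  | [x] => simp
  | [x, y] => simp
  | x :: y :: z :: t => simp [List.take]

lemma match_getElem {l : List Char} {i : Nat} (h : (l.drop i).take 3 = ['I', 'O', 'I']) :
    l[i]? = some 'I' ∧ l[i+1]? = some 'O' ∧ l[i+2]? = some 'I' := by
  rw [take3_iff] at h
  simpa [List.getElem?_drop] using h

lemma match_bound {l : List Char} {i : Nat} (h : (l.drop i).take 3 = ['I', 'O', 'I']) :
    i + 3 ≤ l.length := by
  have h2 := (match_getElem h).2.2
  obtain ⟨hlt, -⟩ := List.getElem?_eq_some_iff.mp h2
  omega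

lemma no_overlap {l : List Char} {i : Nat} (h : (l.drop i).take 3 = ['I', 'O', 'I']) :
    ¬ (l.drop (i + 1)).take 3 = ['I', 'O', 'I'] := by
  intro h2
  have h1 := (match_getElem h).2.1
  have h3 := (match_getElem h2).1
  rw [h1] at h3
  simp at h3

lemma posFrom_eq_nil {l : List Char} {i : Nat} (h : l.length ≤ i + 2) : posFrom l i = [] := by
  revert h
  fun_induction posFrom l i with
  | case1 i hi hm ih => intro h; exact absurd (match_bound hm) (by omega)
  | case2 i hi hm ih => intro h; exact ih (by omega)
  | case3 i hi => intro h; rfl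

lemma posFrom_match {l : List Char} {i : Nat} (h : (l.drop i).take 3 = ['I', 'O', 'I']) :
    posFrom l i = (i : Int) :: posFrom l (i + 1) := by
  have hb := match_bound h
  rw [posFrom]
  simp [h, show i < l.length by omega]

lemma posFrom_skip {l : List Char} {i : Nat} (h : ¬ (l.drop i).take 3 = ['I', 'O', 'I']) :
    posFrom l i = posFrom l (i + 1) := by
  by_cases hi : i < l.length
  · rw [posFrom]; simp [h, hi]
  · rw [posFrom_eq_nil (by omega), posFrom_eq_nil (by omega)]

lemma posFrom_lb {l : List Char} {i : Nat} : ∀ p ∈ posFrom l i, (i : Int) ≤ p := by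
  fun_induction posFrom l i with
  | case1 i hi hm ih =>
    intro p hp
    rcases List.mem_cons.mp hp with h | h
    · omega
    · have := ih p h; omega
  | case2 i hi hm ih =>
    intro p hp; have := ih p hp; omega
  | case3 i hi => intro p hp; simp at hp

lemma gr_shift {e c : Int} {ps : List Int} (h : ∀ p ∈ ps, p ≠ e) :
    gr e c ps = (if c > 0 then [c] else []) ++ gr (e + 1) 0 ps := by
  cases ps with
  | nil => simp [gr]
  | cons p ps =>
    have hp : p ≠ e := h p (List.mem_cons_self ..)
    rw [gr, gr]
    by_cases h1 : p = e + 1 <;> simp [hp, h1]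

lemma loopA_eq (l : List Char) (i : Nat) (c : Int) (acc : List Int) :
    pvLoopA l i c acc = acc ++ gr (i : Int) c (posFrom l i) := by
  fun_induction pvLoopA l i c acc with
  | case1 i c acc hi hm ih =>
    -- match at i
    have hm' : (l.drop i).take 3 = ['I', 'O', 'I'] := by
      have := eq_of_beq hm
      rwa [show ((i : Int) + 3) = ((i + 3 : Nat) : Int) by push_cast; ring,
        PySem.List.slice_natCast, show i + 3 - i = 3 by omega] at this
    rw [ih, posFrom_match hm', posFrom_skip (no_overlap hm'), gr, if_pos rfl]
    norm_cast
  | case2 i c acc hi hm ih =>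
    -- no match at i
    have hm' : ¬ (l.drop i).take 3 = ['I', 'O', 'I'] := by
      intro hc
      apply hm
      rw [show ((i : Int) + 3) = ((i + 3 : Nat) : Int) by push_cast; ring,
        PySem.List.slice_natCast, show i + 3 - i = 3 by omega]
      simpa using hc
    simp only [dite_eq_ite] at ih
    rw [ih, posFrom_skip hm',
      gr_shift (e := (i : Int)) (c := c) (ps := posFrom l (i + 1))
        (fun p hp => by have := posFrom_lb p hp; omega)]
    push_cast
    split_ifs <;> simp
  | case3 i c acc h1 h2 =>
    rw [posFrom_eq_nil (by omega)]
    simp [gr, h2]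
  | case4 i c acc h1 h2 =>
    rw [posFrom_eq_nil (by omega)]
    simp [gr, h2]

def pvFinal (st : Option Int × Int × List Int) : List Int :=
  match st with
  | (_, run, runs) => if run > 0 then runs ++ [run] else runs

lemma foldB_some (ps : List Int) : ∀ (q run : Int) (runs : List Int),
    pvFinal (ps.foldl pvStepB (some q, run, runs)) = runs ++ gr (q + 2) run ps := by
  induction ps with
  | nil =>
    intro q run runs
    simp only [List.foldl_nil, pvFinal, gr]
    split_ifs <;> simp
  | cons p ps ih =>
    intro q run runs
    rw [List.foldl_cons, gr]
    by_cases h : p = q + 2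
    · simp only [pvStepB, Option.any_some, h, beq_self_eq_true, if_pos]
      rw [ih]
    · have hb : ((p == q + 2) = false) := beq_eq_false_iff_ne.mpr h
      simp only [pvStepB, Option.any_some, hb, if_neg h, Bool.false_eq_true, if_false]
      rw [ih]
      split_ifs <;> simp

lemma foldB_start (ps : List Int) (e : Int) :
    pvFinal (ps.foldl pvStepB (none, 0, [])) = gr e 0 ps := by
  cases ps with
  | nil => simp [pvFinal, gr]
  | cons p ps =>
    rw [List.foldl_cons]
    have h1 : pvStepB (none, 0, []) p = (some p, 1, []) := by simp [pvStepB]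
    rw [h1, foldB_some, gr]
    by_cases h : p = e <;> simp [h]

lemma filter_eq_posFrom (l : List Char) (i : Nat) :
    ((PySem.List.pyRange (i : Int) ((l.length : Int) - 2) 1).filter
      (fun p => PySem.List.slice l (some p) (some (p + 3)) == ['I', 'O', 'I'])) = posFrom l i := by
  fun_induction posFrom l i with
  | case1 i hi hm ih =>
    have hb := match_bound hm
    rw [PySem.List.pyRange_one_cons (by omega), List.filter_cons]
    have : (PySem.List.slice l (some (i : Int)) (some ((i : Int) + 3)) == ['I', 'O', 'I']) = true := by
      rw [show ((i : Int) + 3) = ((i + 3 : Nat) : Int) by push_cast; ring,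
        PySem.List.slice_natCast, show i + 3 - i = 3 by omega]
      simpa using hm
    rw [if_pos this, show ((i : Int) + 1) = ((i + 1 : Nat) : Int) by push_cast; ring, ih]
  | case2 i hi hm ih =>
    by_cases hr : (i : Int) < (l.length : Int) - 2
    · rw [PySem.List.pyRange_one_cons hr, List.filter_cons]
      have : (PySem.List.slice l (some (i : Int)) (some ((i : Int) + 3)) == ['I', 'O', 'I']) = false := by
        rw [show ((i : Int) + 3) = ((i + 3 : Nat) : Int) by push_cast; ring,
          PySem.List.slice_natCast, show i + 3 - i = 3 by omega]
        simpa using hm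
      rw [if_neg (by simp [this]), show ((i : Int) + 1) = ((i + 1 : Nat) : Int) by push_cast; ring, ih]
    · rw [PySem.List.pyRange_one_eq_nil (by omega), ← posFrom_skip hm,
        posFrom_eq_nil (by omega)]
      rfl
  | case3 i hi =>
    rw [PySem.List.pyRange_one_eq_nil (by omega)]
    rfl

-- ===== VERDICT (by name: the statement is the Claim_ definition above) =====
theorem countIoIPatterns_spec : Claim_equal_countIoIPatterns := by
  intro s n _
  show pvLoopA s.toList 0 0 [] = countIoIPatterns_alt s n
  have hpos := filter_eq_posFrom s.toList 0
  simp only [Nat.cast_zero] at hpos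
  rw [loopA_eq]
  simp only [Nat.cast_zero, List.nil_append]
  simp only [countIoIPatterns_alt]
  rw [hpos]
  exact (foldB_start (posFrom s.toList 0) 0).symm
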